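-- pv_equiv track=rewrite | github.com/kyeser/scTools | scTools.py | normalForm
-- ===== SOURCE A (Python) =====
-- def fsv(pcset):
--     """Finds smallest values of pcset and returns their index numbers."""
--     l = []
--     for x in range(len(pcset)):
--         if len(l) == 0 or pcset[x] < pcset[l[0]]:
--             l = [x]
--         elif pcset[x] == pcset[l[0]]:
--             l.append(x)
--     return l
--
-- def normalForm(p):
--     """Returns normal form of pcset."""
--     # Remove duplicates (optional, though fail-safe).
--     # p = unique(p)
--     # number of elements in p
--     n = len(p)
--     # Test if p is null set.
--     if n == 0:
--         return p
--     else: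
--         # Arrange p in ascending order.
--         p.sort()
--         q = 1
--         # Produce the set s comprised of all rotations of p.
--         s = [p[y:]+p[0:y] for y in range(n)]
--         # Find the subset subset_s of all pccycs s[z] in s where
--         # i<s[z][0],s[z][n-q]> is minimal.
--         while 1:
--             r = [(z[n-q]-z[0])%12 for z in s]
--             t = fsv(r)
--             subset_s = [s[xx] for xx in t]
--             # Delete all members of s not in subset_s.
--             s = subset_s
--             # If s has only one member, the resulting pccyc is normal_form
--             # If q = n, take any member of s and
--             # the resulting pccyc is normal_form
--             if len(s) == 1 or q == n:
--                 normal_form = s[0]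
--                 return normal_form
--                 break
--             # Otherwise, increment the value of q by 1 and continue.
--             else:
--                 q += 1
--                 continue
-- ===== SOURCE B (Python) =====
-- def spanKey(z, n):
--     """Tuple of spans i<z[0], z[n-q]> for q = 1..n (the narrowing keys, in order)."""
--     return tuple((z[n - q] - z[0]) % 12 for q in range(1, n + 1))
--
-- def normalForm(p):
--     """Returns normal form of pcset (sorts p in place, like the original)."""
--     n = len(p)
--     if n == 0:
--         return p
--     p.sort()
--     s = [p[y:] + p[0:y] for y in range(n)]
--     return min(s, key=lambda z: spanKey(z, n))
-- ===== Notes on version B (the rewrite author's own statement) =====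
-- stated objective: simpler
-- what changed: A's iterative narrowing (repeatedly filtering the rotation set by the argmin of each successive span via fsv until one survivor or q = n) is replaced by a single keyed min over the rotations, using the full span tuple as a lexicographic key; fsv and the while-loop disappear.
import Mathlib
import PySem

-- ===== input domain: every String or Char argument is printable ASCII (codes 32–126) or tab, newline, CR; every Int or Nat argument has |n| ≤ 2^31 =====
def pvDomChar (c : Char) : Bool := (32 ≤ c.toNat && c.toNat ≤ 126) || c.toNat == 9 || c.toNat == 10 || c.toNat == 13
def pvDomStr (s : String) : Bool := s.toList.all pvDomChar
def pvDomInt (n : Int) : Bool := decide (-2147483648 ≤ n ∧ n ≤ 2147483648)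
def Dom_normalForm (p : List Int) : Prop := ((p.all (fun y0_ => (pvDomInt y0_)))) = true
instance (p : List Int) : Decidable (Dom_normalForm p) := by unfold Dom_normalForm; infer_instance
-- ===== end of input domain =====

-- B replaces A's repeated argmin-narrowing loop by one keyed min over the rotations (same cost,
-- plainer); both A and B sort the argument list in place (the equivalence is about the return value,
-- and B performs the same mutation).

-- ===== PORT A =====
-- helper fsv: indices of all minimal values of pcset (all lookups are in range, so pyGetD is exact)
def fsv (pcset : List Int) : List Int :=
  (PySem.List.pyRange 0 (pcset.length : Int) 1).foldl
    (fun l x =>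
      if l.length = 0 ∨ PySem.List.pyGetD pcset x 0 < PySem.List.pyGetD pcset (PySem.List.pyGetD l 0 0) 0 then
        [x]
      else if PySem.List.pyGetD pcset x 0 = PySem.List.pyGetD pcset (PySem.List.pyGetD l 0 0) 0 then
        l ++ [x]
      else l) []

-- the 'while 1' loop of A; fuel n.toNat suffices because the loop always exits by q = n
def nfLoop (n : Int) : Nat → List (List Int) → Int → List Int
  | 0, _, _ => []
  | fuel+1, s, q =>
    let r := s.map fun z => PySem.Int.mod (PySem.List.pyGetD z (n - q) 0 - PySem.List.pyGetD z 0 0) 12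
    let t := fsv r
    let s' := t.map fun xx => PySem.List.pyGetD s xx []
    if s'.length = 1 ∨ q = n then PySem.List.pyGetD s' 0 []
    else nfLoop n fuel s' (q + 1)

def normalForm (p : List Int) : List Int :=
  let n : Int := p.length
  if n = 0 then p
  else
    let ps := PySem.List.sorted p (fun x => x)
    let s := (PySem.List.pyRange 0 n 1).map fun y =>
      PySem.List.slice ps (some y) none ++ PySem.List.slice ps (some 0) (some y)
    nfLoop n n.toNat s 1

-- ===== PORT B =====
-- the span tuple ((z[n-q]-z[0])%12 for q in 1..n), used as a lexicographic key
def spanKey (z : List Int) (n : Int) : List Int :=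
  (PySem.List.pyRange 1 (n + 1) 1).map fun q =>
    PySem.Int.mod (PySem.List.pyGetD z (n - q) 0 - PySem.List.pyGetD z 0 0) 12

def normalForm_alt (p : List Int) : List Int :=
  let n : Int := p.length
  if n = 0 then p
  else
    let ps := PySem.List.sorted p (fun x => x)
    let s := (PySem.List.pyRange 0 n 1).map fun y =>
      PySem.List.slice ps (some y) none ++ PySem.List.slice ps (some 0) (some y)
    PySem.List.minD s (fun z => spanKey z n) []

-- ===== PRECONDITION & SPEC =====
def Spec_normalForm (p : List Int) (out : List Int) : Prop := out = normalForm_alt p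
instance (p : List Int) (out : List Int) : Decidable (Spec_normalForm p out) := by unfold Spec_normalForm; infer_instance

-- ===== CLAIM (what is proved, stated in full; the proofs are below) =====
def Claim_equal_normalForm : Prop := ∀ (p : List Int), Dom_normalForm p → Spec_normalForm p (normalForm p)

-- ===== LEMMAS AND PROOFS =====

-- the q-th narrowing key component of A, and the tail of B's key from component q on
def cK (n q : Int) (z : List Int) : Int :=
  PySem.Int.mod (PySem.List.pyGetD z (n - q) 0 - PySem.List.pyGetD z 0 0) 12

def tkey (n q : Int) (z : List Int) : List Int :=
  (PySem.List.pyRange q (n + 1) 1).map fun j => cK n j z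

lemma tkey_one (n : Int) : tkey n 1 = fun z => spanKey z n := rfl

lemma tkey_cons (n q : Int) (h : q ≤ n) :
    tkey n q = fun z => cK n q z :: tkey n (q + 1) z := by
  funext z
  unfold tkey
  rw [PySem.List.pyRange_one_cons (by omega)]
  simp

lemma tkey_top (n : Int) : tkey n (n + 1) = fun _ => ([] : List Int) := by
  funext z
  unfold tkey
  rw [PySem.List.pyRange_one_eq_nil (by omega)]
  rfl

-- the fold step of PySem.List.min?
def mstep {α κ : Type} [LT κ] [DecidableLT κ] (key : α → κ) (acc : Option α) (x : α) : Option α :=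
  match acc with
  | none => some x
  | some m => if key x < key m then some x else some m

lemma min?_eq_foldl {α κ : Type} [LT κ] [DecidableLT κ] (xs : List α) (key : α → κ) :
    PySem.List.min? xs key = xs.foldl (mstep key) none := rfl

-- lexicographic facts about < on List Int
lemma lex_rel {a b : Int} (l l' : List Int) (h : a < b) : (a :: l) < (b :: l') :=
  List.Lex.rel h

lemma lex_cons_iff (a : Int) (l l' : List Int) : (a :: l) < (a :: l') ↔ l < l' := by
  constructor
  · intro h
    cases h with
    | cons h => exact h
    | rel h => exact absurd h (lt_irrefl a)
  · exact List.Lex.cons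

lemma lex_not_of_gt {a b : Int} (l l' : List Int) (h : b < a) : ¬((a :: l) < (b :: l')) := by
  intro hlt
  cases hlt with
  | cons h2 => exact lt_irrefl a h
  | rel h2 => exact absurd h (not_lt.mpr (le_of_lt h2))

-- min? with a lexicographic cons key = min? of the first-component argmins under the tail key
lemma minfold_aux {α : Type} (f : α → Int) (g : α → List Int) (m : Int) :
    ∀ (s : List α) (acc1 acc2 : Option α),
      (∀ z ∈ s, m ≤ f z) →
      ((acc2 = none ∧ (∃ z ∈ s, f z = m) ∧ (acc1 = none ∨ ∃ w, acc1 = some w ∧ m < f w)) ∨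
       (∃ w, acc1 = some w ∧ acc2 = some w ∧ f w = m)) →
      s.foldl (mstep fun z => f z :: g z) acc1 =
        (s.filter fun z => f z == m).foldl (mstep g) acc2 := by
  intro s
  induction s with
  | nil =>
    intro acc1 acc2 _ hinv
    rcases hinv with ⟨_, ⟨z, hz, _⟩, _⟩ | ⟨w, h1, h2, _⟩
    · exact absurd hz (List.not_mem_nil)
    · simp [h1, h2]
  | cons x t ih =>
    intro acc1 acc2 hmin hinv
    have hmx : m ≤ f x := hmin x List.mem_cons_self
    have hmt : ∀ z ∈ t, m ≤ f z := fun z hz => hmin z (List.mem_cons_of_mem x hz)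
    by_cases hfx : f x = m
    · -- x attains the minimum: it enters the filter
      rw [List.filter_cons_of_pos (by simp [hfx]), List.foldl_cons, List.foldl_cons]
      rcases hinv with ⟨h2, _, hacc1⟩ | ⟨w, h1, h2, hfw⟩
      · subst h2
        rcases hacc1 with h1 | ⟨w, h1, hlt⟩
        · subst h1
          exact ih (some x) (some x) hmt (Or.inr ⟨x, rfl, rfl, hfx⟩)
        · subst h1
          have : ((f x :: g x) < (f w :: g w)) := lex_rel _ _ (hfx ▸ hlt)
          simp only [mstep, if_pos this]
          exact ih (some x) (some x) hmt (Or.inr ⟨x, rfl, rfl, hfx⟩)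
      · subst h1; subst h2
        have hkey : ((f x :: g x) < (f w :: g w)) ↔ g x < g w := by
          rw [hfx, ← hfw]
          exact lex_cons_iff _ _ _
        by_cases hg : g x < g w
        · simp only [mstep, if_pos (hkey.mpr hg), if_pos hg]
          exact ih (some x) (some x) hmt (Or.inr ⟨x, rfl, rfl, hfx⟩)
        · simp only [mstep, if_neg (fun h => hg (hkey.mp h)), if_neg hg]
          exact ih (some w) (some w) hmt (Or.inr ⟨w, rfl, rfl, hfw⟩)
    · -- f x > m: x is filtered out
      have hgt : m < f x := lt_of_le_of_ne hmx (fun h => hfx h.symm)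
      rw [List.filter_cons_of_neg (by simp [hfx]), List.foldl_cons]
      rcases hinv with ⟨h2, ⟨z, hz, hfz⟩, hacc1⟩ | ⟨w, h1, h2, hfw⟩
      · subst h2
        have hzt : z ∈ t := by
          rcases List.mem_cons.mp hz with h | h
          · exact absurd (h ▸ hfz) hfx
          · exact h
        rcases hacc1 with h1 | ⟨w, h1, hlt⟩
        · subst h1
          exact ih (some x) none hmt (Or.inl ⟨rfl, ⟨z, hzt, hfz⟩, Or.inr ⟨x, rfl, hgt⟩⟩)
        · subst h1
          by_cases hk : (f x :: g x) < (f w :: g w)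
          · simp only [mstep, if_pos hk]
            exact ih (some x) none hmt (Or.inl ⟨rfl, ⟨z, hzt, hfz⟩, Or.inr ⟨x, rfl, hgt⟩⟩)
          · simp only [mstep, if_neg hk]
            exact ih (some w) none hmt (Or.inl ⟨rfl, ⟨z, hzt, hfz⟩, Or.inr ⟨w, rfl, hlt⟩⟩)
      · subst h1; subst h2
        have hnk : ¬((f x :: g x) < (f w :: g w)) := lex_not_of_gt _ _ (hfw ▸ hgt)
        simp only [mstep, if_neg hnk]
        exact ih (some w) (some w) hmt (Or.inr ⟨w, rfl, rfl, hfw⟩)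

lemma min?_lex_cons {α : Type} (f : α → Int) (g : α → List Int) (m : Int) (s : List α)
    (hmin : ∀ z ∈ s, m ≤ f z) (hmem : ∃ z ∈ s, f z = m) :
    PySem.List.min? s (fun z => f z :: g z) =
      PySem.List.min? (s.filter fun z => f z == m) g := by
  rw [min?_eq_foldl, min?_eq_foldl]
  exact minfold_aux f g m s none none hmin (Or.inl ⟨rfl, hmem, Or.inl rfl⟩)

lemma foldl_mstep_nil {α : Type} (t : List α) (w : α) :
    t.foldl (mstep fun _ => ([] : List Int)) (some w) = some w := by
  induction t with
  | nil => rfl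
  | cons x t ih => simpa [mstep] using ih

lemma min?_nilkey {α : Type} (s : List α) :
    PySem.List.min? s (fun _ => ([] : List Int)) = s.head? := by
  cases s with
  | nil => rfl
  | cons x t =>
    show (x :: t).foldl (mstep fun _ => ([] : List Int)) none = some x
    simpa [mstep] using foldl_mstep_nil t x

-- fsv, in closed form: the (cast) indices of the minimum of v
def fstep (v : List Int) (l : List Int) (x : Int) : List Int :=
  if l.length = 0 ∨ PySem.List.pyGetD v x 0 < PySem.List.pyGetD v (PySem.List.pyGetD l 0 0) 0 then [x]
  else if PySem.List.pyGetD v x 0 = PySem.List.pyGetD v (PySem.List.pyGetD l 0 0) 0 then l ++ [x]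
  else l

lemma fsv_eq (v : List Int) :
    fsv v = (List.range v.length).foldl (fun l (k : Nat) => fstep v l (k : Int)) [] := by
  unfold fsv
  rw [PySem.List.pyRange_one]
  simp only [Int.sub_zero, Int.toNat_natCast, zero_add]
  rw [List.foldl_map]
  rfl

lemma min?_concat (xs : List Int) (a : Int) :
    (xs ++ [a]).min? = some (match xs.min? with | none => a | some m => min m a) := by
  cases xs with
  | nil => simp
  | cons x t =>
    rw [List.cons_append, List.min?_cons', List.min?_cons', List.foldl_append]
    simp

lemma fsv_closed (v : List Int) :
    ∀ (k : Nat), k ≤ v.length → ∀ m, (v.take k).min? = some m →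
      (List.range k).foldl (fun l (i : Nat) => fstep v l (i : Int)) [] =
        ((List.range k).filter fun i => v.getD i 0 == m).map (fun i : Nat => (i : Int)) := by
  intro k
  induction k with
  | zero => intro _ m hm; simp at hm
  | succ k ih =>
    intro hk1 m hm
    have hklt : k < v.length := by omega
    have htake : v.take (k + 1) = v.take k ++ [v.getD k 0] := by
      rw [List.take_succ, List.getD_eq_getElem v 0 hklt]
      simp [List.getElem?_eq_getElem hklt]
    rw [htake, min?_concat] at hm
    rw [List.range_succ, List.foldl_append, List.filter_append, List.map_append,
      List.foldl_cons, List.foldl_nil]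
    cases k with
    | zero =>
      simp only [List.take_zero, List.min?_nil] at hm
      have hm' : m = v.getD 0 0 := by simpa using hm.symm
      simp only [List.range_zero, List.foldl_nil, List.filter_nil, List.map_nil, List.nil_append]
      show fstep v [] 0 = _
      simp [fstep, hm']
    | succ k' =>
      set k := k' + 1 with hkdef
      have htk : (v.take k).length = k := by
        rw [List.length_take]; omega
      obtain ⟨mk, hmk⟩ : ∃ mk, (v.take k).min? = some mk := by
        cases h : (v.take k).min? with
        | none =>
          rw [List.min?_eq_none_iff] at h
          rw [h] at htk; simp at htk
        | some mk => exact ⟨mk, rfl⟩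
      rw [hmk] at hm
      have hm' : m = min mk (v.getD k 0) := by simpa using hm.symm
      have hmk_spec := List.min?_eq_some_iff.mp hmk
      have hmk_le : ∀ i < k, mk ≤ v.getD i 0 := by
        intro i hi
        have : v.getD i 0 ∈ v.take k := by
          rw [List.getD_eq_getElem v 0 (by omega)]
          have h2 : (v.take k)[i]'(by rw [htk]; omega) ∈ v.take k := List.getElem_mem _
          simpa [List.getElem_take] using h2
        exact hmk_spec.2 _ this
      have hmk_ex : ∃ i, i < k ∧ v.getD i 0 = mk := by
        obtain ⟨j, hj, hjeq⟩ := List.mem_iff_getElem.mp hmk_spec.1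
        refine ⟨j, by omega, ?_⟩
        rw [List.getD_eq_getElem v 0 (by omega)]
        rw [← hjeq]
        simp [List.getElem_take]
      rw [ih (by omega) mk hmk]
      set fl := (List.range k).filter (fun i => v.getD i 0 == mk) with hfl
      obtain ⟨i0, rest, hflc⟩ : ∃ i0 rest, fl = i0 :: rest := by
        cases h : fl with
        | nil =>
          obtain ⟨j, hj, hjeq⟩ := hmk_ex
          have : j ∈ fl := by
            rw [hfl, List.mem_filter]
            exact ⟨List.mem_range.mpr hj, by simp only [beq_iff_eq]; exact hjeq⟩
          rw [h] at this; exact absurd this (List.not_mem_nil)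
        | cons a b => exact ⟨a, b, rfl⟩
      have hi0 : i0 < k ∧ v.getD i0 0 = mk := by
        have : i0 ∈ fl := hflc ▸ List.mem_cons_self
        rw [hfl, List.mem_filter] at this
        exact ⟨List.mem_range.mp this.1, by simpa using this.2⟩
      have hhead : PySem.List.pyGetD (fl.map (fun i : Nat => (i : Int))) 0 0 = (i0 : Int) := by
        rw [hflc]; simp [PySem.List.pyGetD_zero]
      have hget_i0 : PySem.List.pyGetD v (i0 : Int) 0 = mk := by
        rw [PySem.List.pyGetD_natCast]; exact hi0.2
      have hget_k : PySem.List.pyGetD v (k : Int) 0 = v.getD k 0 := PySem.List.pyGetD_natCast v k 0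
      have hlen : (fl.map (fun i : Nat => (i : Int))).length ≠ 0 := by rw [hflc]; simp
      rcases lt_trichotomy (v.getD k 0) mk with hlt | heq | hgt
      · -- new element strictly smaller: restart with [k]
        rw [fstep, if_pos (Or.inr (by rw [hhead, hget_i0, hget_k]; exact hlt))]
        have hmv : m = v.getD k 0 := by rw [hm']; exact min_eq_right (le_of_lt hlt)
        have hnone : (List.range k).filter (fun i => v.getD i 0 == m) = [] := by
          rw [List.filter_eq_nil_iff]
          intro i hi
          have := hmk_le i (List.mem_range.mp hi)
          simp only [beq_iff_eq]
          omega
        rw [hnone]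
        simp [hmv]
      · -- tie: append k
        rw [fstep, if_neg (by
            rw [hhead, hget_i0, hget_k, heq]
            push_neg
            exact ⟨hlen, le_refl mk⟩),
          if_pos (by rw [hhead, hget_i0, hget_k, heq])]

        have hmv : m = mk := by rw [hm', heq]; exact min_self mk
        have hsame : (List.range k).filter (fun i => v.getD i 0 == m) = fl := by rw [hmv]
        rw [hsame]
        simp only [List.filter_cons, List.filter_nil]
        rw [if_pos (by simp only [beq_iff_eq, hmv]; exact heq)]
        simp
      · -- new element strictly larger: keep fl
        rw [fstep, if_neg (by
            rw [hhead, hget_i0, hget_k]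
            push_neg
            exact ⟨hlen, not_lt.mp (by omega)⟩),
          if_neg (by rw [hhead, hget_i0, hget_k]; omega)]
        have hmv : m = mk := by rw [hm']; exact min_eq_left (le_of_lt hgt)
        have hsame : (List.range k).filter (fun i => v.getD i 0 == m) = fl := by rw [hmv]
        rw [hsame]
        simp only [List.filter_cons, List.filter_nil]
        rw [if_neg (by simp only [hmv, beq_iff_eq]; omega)]
        simp

lemma filter_index_map {α : Type} (s : List α) (p : α → Bool) (d : α) :
    ((List.range s.length).filter fun i => p (s.getD i d)).map (fun i => s.getD i d) =
      s.filter p := by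
  induction s using List.reverseRecOn with
  | nil => rfl
  | append_singleton s x ih =>
    rw [List.length_append, List.length_singleton, List.range_succ, List.filter_append,
      List.map_append, List.filter_append]
    congr 1
    · rw [← ih]
      have hpred : ∀ i ∈ List.range s.length,
          p ((s ++ [x]).getD i d) = p (s.getD i d) := by
        intro i hi
        rw [List.getD_append _ _ _ _ (List.mem_range.mp hi)]
      rw [List.filter_congr hpred]
      apply List.map_congr_left
      intro i hi
      have := List.mem_range.mp (List.mem_of_mem_filter hi)
      rw [List.getD_append _ _ _ _ this]
    · have hx : (s ++ [x]).getD s.length d = x := by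
        have : s.length < (s ++ [x]).length := by simp
        rw [List.getD_eq_getElem _ _ this]
        simp
      simp only [List.filter, hx]
      by_cases hp : p x = true
      · simp [hp]
      · simp [hp]

lemma minD_def {α κ : Type} [LT κ] [DecidableLT κ] (xs : List α) (key : α → κ) (d : α) :
    PySem.List.minD xs key d = (PySem.List.min? xs key).getD d := rfl

-- the main loop lemma: A's narrowing loop computes B's keyed min
lemma loop_eq (n : Int) :
    ∀ (fuel : Nat) (q : Int) (s : List (List Int)), s ≠ [] → 1 ≤ q → q ≤ n →
      (n - q).toNat < fuel →
      nfLoop n fuel s q = PySem.List.minD s (tkey n q) [] := by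
  intro fuel
  induction fuel with
  | zero => intro q s _ _ _ h; omega
  | succ fuel ih =>
    intro q s hs hq1 hqn hfuel
    have hbody : nfLoop n (fuel + 1) s q =
        (if ((fsv (s.map (cK n q))).map fun xx => PySem.List.pyGetD s xx []).length = 1 ∨ q = n
         then PySem.List.pyGetD ((fsv (s.map (cK n q))).map fun xx => PySem.List.pyGetD s xx []) 0 []
         else nfLoop n fuel ((fsv (s.map (cK n q))).map fun xx => PySem.List.pyGetD s xx []) (q + 1)) := by
      simp only [nfLoop]; rfl
    obtain ⟨m, hm⟩ : ∃ m, (s.map (cK n q)).min? = some m := by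
      cases h : (s.map (cK n q)).min? with
      | none =>
        rw [List.min?_eq_none_iff, List.map_eq_nil_iff] at h
        exact absurd h hs
      | some m => exact ⟨m, rfl⟩
    have hs' : (fsv (s.map (cK n q))).map (fun xx => PySem.List.pyGetD s xx []) =
        s.filter (fun z => cK n q z == m) := by
      rw [fsv_eq, fsv_closed (s.map (cK n q)) (s.map (cK n q)).length (le_refl _) m
        (by rwa [List.take_length]), List.map_map]
      have h1 : (((List.range (s.map (cK n q)).length).filter
            fun i => (s.map (cK n q)).getD i 0 == m).map
            ((fun xx => PySem.List.pyGetD s xx []) ∘ (fun i : Nat => (i : Int))))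
          = (((List.range (s.map (cK n q)).length).filter
            fun i => (s.map (cK n q)).getD i 0 == m).map (fun i : Nat => s.getD i [])) := by
        apply List.map_congr_left
        intro i hi
        simp [PySem.List.pyGetD_natCast]
      rw [h1]
      have h2 : ((List.range (s.map (cK n q)).length).filter
            fun i => (s.map (cK n q)).getD i 0 == m)
          = (List.range s.length).filter fun i => (cK n q (s.getD i []) == m) := by
        rw [List.length_map]
        apply List.filter_congr
        intro i hi
        have hi' := List.mem_range.mp hi
        rw [List.getD_eq_getElem _ _ (by simpa using hi'), List.getElem_map,
          List.getD_eq_getElem _ _ hi']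
      rw [h2, filter_index_map s (fun z => cK n q z == m) []]
    rw [hbody, hs']
    have hmin : ∀ z ∈ s, m ≤ cK n q z := fun z hz =>
      (List.min?_eq_some_iff.mp hm).2 _ (List.mem_map_of_mem hz)
    have hmem : ∃ z ∈ s, cK n q z = m := by
      obtain ⟨z, hz, hfz⟩ := List.mem_map.mp (List.min?_eq_some_iff.mp hm).1
      exact ⟨z, hz, hfz⟩
    have hsf_ne : s.filter (fun z => cK n q z == m) ≠ [] := by
      obtain ⟨z, hz, hfz⟩ := hmem
      intro h
      have hzin : z ∈ s.filter (fun z => cK n q z == m) :=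
        List.mem_filter.mpr ⟨hz, by simp [hfz]⟩
      rw [h] at hzin
      exact absurd hzin (List.not_mem_nil)
    have hL3 : PySem.List.min? s (tkey n q) =
        PySem.List.min? (s.filter fun z => cK n q z == m) (tkey n (q + 1)) := by
      rw [tkey_cons n q hqn]
      exact min?_lex_cons (cK n q) (tkey n (q + 1)) m s hmin hmem
    by_cases h1 : (s.filter (fun z => cK n q z == m)).length = 1
    · obtain ⟨w, hw⟩ := List.length_eq_one_iff.mp h1
      rw [if_pos (Or.inl h1), hw, minD_def, hL3, hw]
      have : PySem.List.min? [w] (tkey n (q + 1)) = some w := rfl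
      rw [this]
      simp [PySem.List.pyGetD_zero]
    · by_cases h2 : q = n
      · rw [if_pos (Or.inr h2), minD_def, hL3, h2, tkey_top n, min?_nilkey]
        cases hsf : s.filter (fun z => cK n q z == m) with
        | nil => exact absurd hsf hsf_ne
        | cons w t =>
          rw [h2] at hsf
          rw [hsf]
          simp [PySem.List.pyGetD_zero]
      · have hqlt : q < n := lt_of_le_of_ne hqn h2
        rw [if_neg (by push_neg; exact ⟨h1, h2⟩)]
        rw [ih (q + 1) (s.filter (fun z => cK n q z == m)) hsf_ne (by omega) (by omega) (by omega)]
        rw [minD_def, minD_def, hL3]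

-- ===== VERDICT (by name: the statement is the Claim_ definition above) =====
theorem normalForm_spec : Claim_equal_normalForm := by
  intro p _
  unfold Spec_normalForm normalForm normalForm_alt
  by_cases hn : (p.length : Int) = 0
  · simp [hn]
  · simp only [hn, if_false]
    have hn1 : 1 ≤ (p.length : Int) := by omega
    have hs : ((PySem.List.pyRange 0 (p.length : Int) 1).map fun y =>
        PySem.List.slice (PySem.List.sorted p (fun x => x)) (some y) none ++
          PySem.List.slice (PySem.List.sorted p (fun x => x)) (some 0) (some y)) ≠ [] := by
      intro h
      rw [List.map_eq_nil_iff] at h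
      have := congrArg List.length h
      rw [PySem.List.length_pyRange_one] at this
      simp only [List.length_nil] at this
      omega
    rw [loop_eq (p.length : Int) (p.length : Int).toNat 1 _ hs (le_refl 1) hn1 (by omega), tkey_one]
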